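-- pv_equiv track=rewrite | github.com/IzzyN/timetable_generator | timetable_generator.py | setup_blank_timetable
-- ===== SOURCE A (Python) =====
-- days = set([]) 	#SET
--
-- def setup_blank_timetable(days=days):
-- 	timetable = {}
-- 	times = []
--
--
-- 	for day in days:
-- 		timetable[day] = {}
-- 		for time in range(1000, 2000, 50):
-- 			if str(time)[-2:] == '50':
-- 				time -= 20
-- 			#times.append(time)
-- 			timetable[day][time] = None
-- 	#pprint(timetable)
-- 	return(timetable)
-- ===== SOURCE B (Python) =====
-- days = set([])
--
-- def setup_blank_timetable(days=days):
--     slots = [hour * 100 + minute for hour in range(10, 20) for minute in (0, 30)]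
--     return {day: dict.fromkeys(slots) for day in days}
-- ===== Notes on version B (the rewrite author's own statement) =====
-- stated objective: simpler
-- what changed: Replaces the range(1000,2000,50) loop with the string-suffix '-20' fixup and per-key dict mutation by a direct two-level arithmetic enumeration of the slots (hour 10..19, minute 0/30), computed once, and a dict comprehension with dict.fromkeys.
import Mathlib
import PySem

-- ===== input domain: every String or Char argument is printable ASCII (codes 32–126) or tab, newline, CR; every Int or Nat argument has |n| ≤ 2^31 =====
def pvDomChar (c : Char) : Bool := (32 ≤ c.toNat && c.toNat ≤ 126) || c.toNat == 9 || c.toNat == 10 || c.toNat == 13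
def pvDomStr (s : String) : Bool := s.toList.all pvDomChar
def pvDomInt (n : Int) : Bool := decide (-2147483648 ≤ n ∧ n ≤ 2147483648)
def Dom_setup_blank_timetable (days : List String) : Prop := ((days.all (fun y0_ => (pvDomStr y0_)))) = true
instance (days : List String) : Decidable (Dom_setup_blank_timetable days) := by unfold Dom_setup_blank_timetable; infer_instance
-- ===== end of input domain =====

-- B replaces the range(1000,2000,50) + string-suffix fixup and per-key mutation by a direct
-- arithmetic enumeration of the slots and a dict comprehension (simpler).

-- ===== PORT A =====
def setup_blank_timetable (days : List String) : List (String × List (Int × Option Int)) :=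
  -- timetable = {}; for day in days: timetable[day] = {}; inner loop mutates timetable[day]
  let timetable : PySem.Dict String (PySem.Dict Int (Option Int)) :=
    days.foldl (fun tt day =>
      let inner : PySem.Dict Int (Option Int) :=
        (PySem.List.pyRange 1000 2000 50).foldl (fun d time =>
          -- if str(time)[-2:] == '50': time -= 20
          let time := if PySem.List.slice (PySem.Int.toChars time) (some (-2)) none
                        = ['5', '0'] then time - 20 else time
          d.insert time none) PySem.Dict.empty
      tt.insert day inner) PySem.Dict.empty
  timetable.items.map (fun p => (p.1, p.2.items))

-- ===== PORT B =====
-- slots = [hour*100 + minute for hour in range(10, 20) for minute in (0, 30)]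
def pvSlots : List Int :=
  (PySem.List.pyRange 10 20 1).flatMap (fun hour => [0, 30].map (fun minute => hour * 100 + minute))

def setup_blank_timetable_alt (days : List String) : List (String × List (Int × Option Int)) :=
  -- {day: dict.fromkeys(slots) for day in days}
  let timetable : PySem.Dict String (PySem.Dict Int (Option Int)) :=
    days.foldl (fun tt day => tt.insert day (PySem.Dict.ofList (pvSlots.map (fun t => (t, none))))) PySem.Dict.empty
  timetable.items.map (fun p => (p.1, p.2.items))

-- ===== PRECONDITION & SPEC =====
def Spec_setup_blank_timetable (days : List String) (out : List (String × List (Int × Option Int))) : Prop := out = setup_blank_timetable_alt days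
instance (days : List String) (out : List (String × List (Int × Option Int))) : Decidable (Spec_setup_blank_timetable days out) := by unfold Spec_setup_blank_timetable; infer_instance

-- ===== CLAIM (what is proved, stated in full; the proofs are below) =====
def Claim_equal_setup_blank_timetable : Prop := ∀ (days : List String), Dom_setup_blank_timetable days → Spec_setup_blank_timetable days (setup_blank_timetable days)

-- ===== LEMMAS AND PROOFS =====

-- the constant inner value both programs attach to every day is the same dict
lemma pv_inner_eq :
    ((PySem.List.pyRange 1000 2000 50).foldl (fun d time =>
        let time := if PySem.List.slice (PySem.Int.toChars time) (some (-2)) none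
                      = ['5', '0'] then time - 20 else time
        d.insert time none) PySem.Dict.empty : PySem.Dict Int (Option Int))
      = PySem.Dict.ofList (pvSlots.map (fun t => (t, none))) := by
  decide

-- ===== VERDICT (by name: the statement is the Claim_ definition above) =====
theorem setup_blank_timetable_spec : Claim_equal_setup_blank_timetable := by
  intro days _
  unfold Spec_setup_blank_timetable setup_blank_timetable setup_blank_timetable_alt
  simp only [pv_inner_eq]
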